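-- pv_equiv track=rewrite | github.com/ShyamGupta1/hackrx-pdf-api | api/index.py | find_relevant_content
-- ===== SOURCE A (Python) =====
-- def find_relevant_content(text: str, question: str, max_chars: int = 3000) -> str:
--     question_lower = question.lower()
--     words = question_lower.split()
--
--     sentences = text.split('.')
--     relevant_sentences = []
--
--     for sentence in sentences:
--         sentence_lower = sentence.lower()
--         score = sum(1 for word in words if word in sentence_lower)
--         if score > 0:
--             relevant_sentences.append((sentence.strip(), score))
--
--     relevant_sentences.sort(key=lambda x: x[1], reverse=True)
--
--     result = ""
--     for sentence, _ in relevant_sentences: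
--         if len(result + sentence) < max_chars:
--             result += sentence + ". "
--         else:
--             break
--
--     return result.strip() or text[:max_chars]
-- ===== SOURCE B (Python) =====
-- def find_relevant_content(text: str, question: str, max_chars: int = 3000) -> str:
--     words = question.lower().split()
--     buckets = {}
--     for sentence in text.split('.'):
--         sentence_lower = sentence.lower()
--         score = sum(1 for word in words if word in sentence_lower)
--         if score > 0:
--             buckets.setdefault(score, []).append(sentence.strip())
--     result = ""
--     for score in range(len(words), 0, -1):
--         for sentence in buckets.get(score, []):
--             if len(result) + len(sentence) < max_chars:
--                 result += sentence + ". "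
--             else:
--                 return result.strip() or text[:max_chars]
--     return result.strip() or text[:max_chars]
-- ===== Notes on version B (the rewrite author's own statement) =====
-- stated objective: alternative
-- what changed: B replaces A's collect-then-stable-sort of (sentence, score) tuples by a dict of score buckets filled in one pass and emitted from the highest score down, with an early return instead of a break.
import Mathlib
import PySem

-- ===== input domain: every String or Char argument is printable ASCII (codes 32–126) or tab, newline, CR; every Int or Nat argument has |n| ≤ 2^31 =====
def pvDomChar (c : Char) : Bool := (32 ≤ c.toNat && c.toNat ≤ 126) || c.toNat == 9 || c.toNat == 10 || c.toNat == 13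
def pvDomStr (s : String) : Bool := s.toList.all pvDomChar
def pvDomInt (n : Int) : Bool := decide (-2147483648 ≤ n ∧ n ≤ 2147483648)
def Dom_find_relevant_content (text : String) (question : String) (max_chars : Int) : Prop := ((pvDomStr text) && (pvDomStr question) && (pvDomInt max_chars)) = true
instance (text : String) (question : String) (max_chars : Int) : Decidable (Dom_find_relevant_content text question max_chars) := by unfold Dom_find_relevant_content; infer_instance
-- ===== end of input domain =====

-- B groups qualifying sentences into score buckets (a dict) and emits them from the highest
-- score down instead of collecting (sentence, score) tuples and stable-sorting them; the
-- greedy fill and the fallback are the same.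

-- ===== PORT A =====
-- A's final for-loop with break: recursion over the sorted (sentence, score) pairs.
def pvLoopA (mc : Int) : List (List Char × Int) → List Char → List Char
  | [], result => result
  | p :: rest, result =>
    if ((result ++ p.1).length : Int) < mc then
      pvLoopA mc rest (result ++ p.1 ++ ('.' :: ' ' :: []))
    else result

def find_relevant_content (text : String) (question : String) (max_chars : Int) : String :=
  let question_lower := PySem.Chars.lower question.toList
  let words := PySem.Chars.split₀ question_lower
  let sentences := PySem.Chars.splitOn text.toList ['.']
  let relevant_sentences := sentences.foldl (fun acc sentence =>
      let sentence_lower := PySem.Chars.lower sentence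
      let score : Int := words.foldl (fun acc w => if PySem.Chars.isIn w sentence_lower then acc + 1 else acc) 0
      if 0 < score then acc ++ [(PySem.Chars.strip sentence, score)] else acc) []
  let sorted := PySem.List.sorted relevant_sentences (fun x => x.2) true
  let result := pvLoopA max_chars sorted []
  let stripped := PySem.Chars.strip result
  if stripped = [] then String.ofList (PySem.Chars.slice text.toList none (some max_chars))
  else String.ofList stripped

-- ===== PORT B =====
-- B's inner for-loop over one bucket: (result, true) is the early-return path.
def pvInnerB (mc : Int) : List (List Char) → List Char → List Char × Bool
  | [], result => (result, false)
  | s :: rest, result =>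
    if ((result.length : Int) + (s.length : Int) < mc) then
      pvInnerB mc rest (result ++ s ++ ('.' :: ' ' :: []))
    else (result, true)

def pvOuterB (buckets : PySem.Dict Int (List (List Char))) (mc : Int) : List Int → List Char → List Char
  | [], result => result
  | sc :: rest, result =>
    match pvInnerB mc (buckets.getD sc []) result with
    | (r, true) => r
    | (r, false) => pvOuterB buckets mc rest r

def find_relevant_content_alt (text : String) (question : String) (max_chars : Int) : String :=
  let words := PySem.Chars.split₀ (PySem.Chars.lower question.toList)
  let buckets := (PySem.Chars.splitOn text.toList ['.']).foldl (fun d sentence =>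
      let sentence_lower := PySem.Chars.lower sentence
      let score : Int := words.foldl (fun acc w => if PySem.Chars.isIn w sentence_lower then acc + 1 else acc) 0
      if 0 < score then d.modify score [] (fun l => l ++ [PySem.Chars.strip sentence]) else d)
    PySem.Dict.empty
  let result := pvOuterB buckets max_chars (PySem.List.pyRange (words.length : Int) 0 (-1)) []
  let stripped := PySem.Chars.strip result
  if stripped = [] then String.ofList (PySem.Chars.slice text.toList none (some max_chars))
  else String.ofList stripped


-- ===== PRECONDITION & SPEC =====
def Spec_find_relevant_content (text : String) (question : String) (max_chars : Int) (out : String) : Prop := out = find_relevant_content_alt text question max_chars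
instance (text : String) (question : String) (max_chars : Int) (out : String) : Decidable (Spec_find_relevant_content text question max_chars out) := by unfold Spec_find_relevant_content; infer_instance

-- ===== CLAIM (what is proved, stated in full; the proofs are below) =====
def Claim_equal_find_relevant_content : Prop := ∀ (text : String) (question : String) (max_chars : Int), Dom_find_relevant_content text question max_chars → Spec_find_relevant_content text question max_chars (find_relevant_content text question max_chars)

-- ===== LEMMAS AND PROOFS =====

theorem pv_insertBy_append {α : Type} (before : α → α → Bool) (x : α) (ys1 ys2 : List α)
    (h : ∀ y ∈ ys1, before x y = false) :
    PySem.List.insertBy before x (ys1 ++ ys2) = ys1 ++ PySem.List.insertBy before x ys2 := by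
  induction ys1 with
  | nil => simp
  | cons y t ih =>
    simp only [List.cons_append, PySem.List.insertBy, h y (by simp)]
    simp only [Bool.false_eq_true, if_false]
    rw [ih (fun z hz => h z (by simp [hz]))]

theorem pv_insertBy_front {α : Type} (before : α → α → Bool) (x : α) (ys : List α)
    (h : ∀ y ∈ ys, before x y = true) :
    PySem.List.insertBy before x ys = x :: ys := by
  cases ys with
  | nil => rfl
  | cons y t => simp [PySem.List.insertBy, h y (by simp)]

theorem pv_pyRange_down (m : Nat) :
    PySem.List.pyRange (m : Int) 0 (-1) = (List.range m).map (fun k : Nat => ((m : Int) - (k : Int))) := by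
  simp only [PySem.List.pyRange]
  have hne : (-1 : Int) ≠ 0 := by norm_num
  rw [if_neg hne]
  have h2 : ¬ (0:Int) < -1 := by norm_num
  rw [if_neg h2]
  by_cases h : (0:Int) < (m : Int)
  · rw [if_pos h]
    have hc : (((m:Int) - 0 + -(-1) - 1) / -(-1)).toNat = m := by
      norm_num
    rw [hc]
    refine List.map_congr_left ?_
    intro k _; ring
  · have : m = 0 := by omega
    subst this
    norm_num

theorem pv_insert_buckets {α : Type} (l : List (α × Int)) (x : α × Int) (ss : List Int)
    (hp : ss.Pairwise (fun a b => b < a)) (hm : x.2 ∈ ss) :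
    PySem.List.insertBy (fun a b => decide (b.2 < a.2)) x
        (ss.flatMap (fun s => l.filter (fun y => y.2 == s)))
      = ss.flatMap (fun s => (l ++ [x]).filter (fun y => y.2 == s)) := by
  induction ss with
  | nil => simp at hm
  | cons s t iht =>
    have hpt : t.Pairwise (fun a b => b < a) := hp.of_cons
    have hst : ∀ u ∈ t, u < s := fun u hu => (List.pairwise_cons.mp hp).1 u hu
    simp only [List.flatMap_cons]
    by_cases hs : x.2 = s
    · have hnott : x.2 ∉ t := fun hmem => absurd (hst _ hmem) (by omega)
      rw [pv_insertBy_append _ _ _ _ (by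
        intro y hy
        simp only [List.mem_filter, beq_iff_eq] at hy
        simp [hy.2, hs])]
      rw [pv_insertBy_front _ _ _ (by
        intro y hy
        simp only [List.mem_flatMap, List.mem_filter, beq_iff_eq] at hy
        obtain ⟨u, hu, _, hyu⟩ := hy
        simp only [decide_eq_true_eq]
        rw [hyu, hs]; exact hst u hu)]
      have hbt : ∀ u ∈ t, (l ++ [x]).filter (fun y => y.2 == u) = l.filter (fun y => y.2 == u) := by
        intro u hu
        rw [List.filter_append]
        have : List.filter (fun y => y.2 == u) [x] = [] := by
          have : x.2 ≠ u := fun he => hnott (he ▸ hu)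
          simp [this]
        simp [this]
      rw [List.flatMap_congr hbt]
      simp [List.filter_append, hs]
    · have hmt : x.2 ∈ t := by
        rcases List.mem_cons.mp hm with h1 | h2
        · exact absurd h1 hs
        · exact h2
      have hxs : x.2 < s := hst _ hmt
      rw [pv_insertBy_append _ _ _ _ (by
        intro y hy
        simp only [List.mem_filter, beq_iff_eq] at hy
        simp only [decide_eq_false_iff_not, not_lt]
        omega)]
      rw [iht hpt hmt]
      simp [List.filter_append, List.filter_cons, hs]

theorem pv_sorted_eq_buckets {α : Type} (l : List (α × Int)) (n : Nat)
    (h : ∀ x ∈ l, 1 ≤ x.2 ∧ x.2 ≤ (n : Int)) :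
    PySem.List.sorted l (fun x => x.2) true
      = (PySem.List.pyRange (n : Int) 0 (-1)).flatMap (fun s => l.filter (fun x => x.2 == s)) := by
  induction l using List.reverseRecOn with
  | nil => simp [PySem.List.sorted]
  | append_singleton l x ih =>
    have hx := h x (by simp)
    have hl : ∀ y ∈ l, 1 ≤ y.2 ∧ y.2 ≤ (n : Int) := fun y hy => h y (by simp [hy])
    rw [PySem.List.sorted_rev_eq_foldl_insertBy, List.foldl_append]
    simp only [List.foldl_cons, List.foldl_nil]
    rw [← PySem.List.sorted_rev_eq_foldl_insertBy, ih hl]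
    rw [pv_pyRange_down]
    rw [pv_insert_buckets l x ((List.range n).map (fun k : Nat => ((n : Int) - (k : Int))))
      (by
        refine List.Pairwise.map _ ?_ List.pairwise_lt_range
        intro a b hab; omega)
      (by
        simp only [List.mem_map, List.mem_range]
        exact ⟨((n:Int) - x.2).toNat, by omega, by omega⟩)]

theorem pv_loopA_append (mc : Int) (ps qs : List (List Char × Int)) (r : List Char) :
    pvLoopA mc (ps ++ qs) r =
      match pvInnerB mc (ps.map (fun p => p.1)) r with
      | (r', true) => r'
      | (r', false) => pvLoopA mc qs r' := by
  induction ps generalizing r with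
  | nil => simp [pvInnerB]
  | cons p t ih =>
    simp only [List.cons_append, List.map_cons, pvLoopA, pvInnerB]
    have hlen : (((r ++ p.1).length : Int)) = (r.length : Int) + (p.1.length : Int) := by
      simp [List.length_append]
    rw [hlen]
    split_ifs with hc
    · exact ih _
    · rfl

theorem pv_outerB_eq (buckets : PySem.Dict Int (List (List Char))) (mc : Int)
    (rel : List (List Char × Int))
    (hb : ∀ s, buckets.getD s [] = (rel.filter (fun y => y.2 == s)).map (fun p => p.1)) :
    ∀ (ss : List Int) (r : List Char),
      pvOuterB buckets mc ss r
        = pvLoopA mc (ss.flatMap (fun s => rel.filter (fun y => y.2 == s))) r := by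
  intro ss
  induction ss with
  | nil => intro r; rfl
  | cons s t ih =>
    intro r
    simp only [pvOuterB, List.flatMap_cons]
    rw [pv_loopA_append, hb s]
    cases hI : pvInnerB mc ((rel.filter (fun y => y.2 == s)).map (fun p => p.1)) r with
    | mk r' b =>
      cases b with
      | true => rfl
      | false => simpa using ih r'

def pvScore (words : List (List Char)) (s : List Char) : Int :=
  words.foldl (fun acc w => if PySem.Chars.isIn w (PySem.Chars.lower s) then acc + 1 else acc) 0

theorem pv_main (text question : String) (max_chars : Int) :
    find_relevant_content text question max_chars = find_relevant_content_alt text question max_chars := by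
  unfold find_relevant_content find_relevant_content_alt
  set words := PySem.Chars.split₀ (PySem.Chars.lower question.toList) with hw
  set sents := PySem.Chars.splitOn text.toList ['.'] with hsents
  have hrel : sents.foldl (fun acc sentence =>
      let sentence_lower := PySem.Chars.lower sentence
      let score : Int := words.foldl (fun acc w => if PySem.Chars.isIn w sentence_lower then acc + 1 else acc) 0
      if 0 < score then acc ++ [(PySem.Chars.strip sentence, score)] else acc) []
      = (sents.filter (fun x => decide (0 < pvScore words x))).map
          (fun s => (PySem.Chars.strip s, pvScore words s)) := by
    have hbody : (fun (acc : List (List Char × Int)) (sentence : List Char) =>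
        let sentence_lower := PySem.Chars.lower sentence
        let score : Int := words.foldl (fun acc w => if PySem.Chars.isIn w sentence_lower then acc + 1 else acc) 0
        if 0 < score then acc ++ [(PySem.Chars.strip sentence, score)] else acc)
        = (fun acc x => if 0 < pvScore words x then acc ++ [(PySem.Chars.strip x, pvScore words x)] else acc) := rfl
    rw [hbody]
    rw [PySem.List.foldl_append_ite (fun x => 0 < pvScore words x)
      (fun s => (PySem.Chars.strip s, pvScore words s)) sents []]
    simp
  have hbuck : sents.foldl (fun d sentence =>
      let sentence_lower := PySem.Chars.lower sentence
      let score : Int := words.foldl (fun acc w => if PySem.Chars.isIn w sentence_lower then acc + 1 else acc) 0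
      if 0 < score then d.modify score [] (fun l => l ++ [PySem.Chars.strip sentence]) else d)
      (PySem.Dict.empty)
      = ((sents.filter (fun x => decide (0 < pvScore words x))).map
          (fun s => (pvScore words s, PySem.Chars.strip s))).foldl
          (fun d p => d.modify p.1 [] (fun l => l ++ [p.2])) PySem.Dict.empty := by
    have hbody : (fun (d : PySem.Dict Int (List (List Char))) (sentence : List Char) =>
        let sentence_lower := PySem.Chars.lower sentence
        let score : Int := words.foldl (fun acc w => if PySem.Chars.isIn w sentence_lower then acc + 1 else acc) 0
        if 0 < score then d.modify score [] (fun l => l ++ [PySem.Chars.strip sentence]) else d)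
        = (fun d x => if 0 < pvScore words x then PySem.Dict.modify d (pvScore words x) [] (fun l => l ++ [PySem.Chars.strip x]) else d) := rfl
    rw [hbody]
    rw [PySem.List.foldl_ite_eq_foldl_filter (fun x => 0 < pvScore words x)
      (fun d s => PySem.Dict.modify d (pvScore words s) [] (fun l => l ++ [PySem.Chars.strip s])) sents PySem.Dict.empty]
    rw [List.foldl_map]
  set rel := (sents.filter (fun x => decide (0 < pvScore words x))).map
      (fun s => (PySem.Chars.strip s, pvScore words s)) with hrelDef
  have hscore_le : ∀ s, pvScore words s ≤ (words.length : Int) := by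
    intro s
    unfold pvScore
    rw [PySem.List.foldl_ite_add_one]
    have := List.countP_le_length (l := words)
      (p := fun x => decide (PySem.Chars.isIn x (PySem.Chars.lower s) = true))
    omega
  have hbounds : ∀ x ∈ rel, 1 ≤ x.2 ∧ x.2 ≤ ((words.length : Nat) : Int) := by
    intro x hx
    rw [hrelDef] at hx
    simp only [List.mem_map, List.mem_filter, decide_eq_true_eq] at hx
    obtain ⟨s, ⟨_, hpos⟩, hxe⟩ := hx
    subst hxe
    exact ⟨by omega, hscore_le s⟩
  have hb : ∀ c, (((sents.filter (fun x => decide (0 < pvScore words x))).map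
          (fun s => (pvScore words s, PySem.Chars.strip s))).foldl
          (fun d p => d.modify p.1 [] (fun l => l ++ [p.2])) PySem.Dict.empty).getD c []
      = (rel.filter (fun y => y.2 == c)).map (fun p => p.1) := by
    intro c
    rw [PySem.Dict.getD_foldl_modify_append]
    rw [hrelDef]
    simp only [List.filter_map, List.map_map]
    have hemp : PySem.Dict.empty.getD c ([] : List (List Char)) = [] := by rfl
    rw [hemp]
    simp [Function.comp_def]
  have hres : pvLoopA max_chars (PySem.List.sorted (sents.foldl (fun acc sentence =>
      let sentence_lower := PySem.Chars.lower sentence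
      let score : Int := words.foldl (fun acc w => if PySem.Chars.isIn w sentence_lower then acc + 1 else acc) 0
      if 0 < score then acc ++ [(PySem.Chars.strip sentence, score)] else acc) []) (fun x => x.2) true) []
      = pvOuterB (sents.foldl (fun d sentence =>
      let sentence_lower := PySem.Chars.lower sentence
      let score : Int := words.foldl (fun acc w => if PySem.Chars.isIn w sentence_lower then acc + 1 else acc) 0
      if 0 < score then d.modify score [] (fun l => l ++ [PySem.Chars.strip sentence]) else d)
      PySem.Dict.empty) max_chars (PySem.List.pyRange (words.length : Int) 0 (-1)) [] := by
    rw [hrel, hbuck]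
    rw [pv_outerB_eq _ max_chars rel hb]
    rw [pv_sorted_eq_buckets rel words.length hbounds]
  exact congrArg (fun r =>
    let stripped := PySem.Chars.strip r
    if stripped = [] then String.ofList (PySem.Chars.slice text.toList none (some max_chars))
    else String.ofList stripped) hres

-- ===== VERDICT (by name: the statement is the Claim_ definition above) =====
theorem find_relevant_content_spec : Claim_equal_find_relevant_content := by
  intro text question max_chars _
  unfold Spec_find_relevant_content
  exact pv_main text question max_chars
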